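-- pv_equiv track=rewrite | github.com/tunelko/ctf-2026 | upCTF2026/misc/misc_vibedns/solve.py | compute_key_tag
-- ===== SOURCE A (Python) =====
-- def compute_key_tag(dnskey_rdata):
--     ac = 0
--     for i, byte in enumerate(dnskey_rdata):
--         if i % 2 == 0:
--             ac += byte << 8
--         else:
--             ac += byte
--     return ((ac & 0xFFFF) + (ac >> 16)) & 0xFFFF
-- ===== SOURCE B (Python) =====
-- def compute_key_tag(dnskey_rdata):
--     hi = sum(dnskey_rdata[0::2])
--     lo = sum(dnskey_rdata[1::2])
--     ac = (hi << 8) + lo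
--     return ((ac & 0xFFFF) + (ac >> 16)) & 0xFFFF
-- ===== Notes on version B (the rewrite author's own statement) =====
-- stated objective: alternative
-- what changed: Replaces the single indexed loop with its per-element parity branch by two stride-2 slices summed separately (hi/lo) and combined once into ac; no enumerate and no branching.
import Mathlib
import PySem

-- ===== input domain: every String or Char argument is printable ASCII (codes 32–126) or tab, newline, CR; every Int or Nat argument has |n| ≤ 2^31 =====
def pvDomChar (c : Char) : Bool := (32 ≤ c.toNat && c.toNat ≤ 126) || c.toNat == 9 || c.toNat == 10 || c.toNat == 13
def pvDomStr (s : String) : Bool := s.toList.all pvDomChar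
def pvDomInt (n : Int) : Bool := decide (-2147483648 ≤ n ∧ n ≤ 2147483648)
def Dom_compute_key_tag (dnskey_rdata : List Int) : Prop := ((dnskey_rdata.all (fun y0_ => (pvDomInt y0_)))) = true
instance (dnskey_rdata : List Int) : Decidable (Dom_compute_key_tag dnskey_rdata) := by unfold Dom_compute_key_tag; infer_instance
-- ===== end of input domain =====

-- B replaces A's parity-branching indexed loop by two separate sums over the even- and
-- odd-index stride-2 slices, combined once (objective: alternative decomposition, same cost).

-- ===== PORT A =====
-- 'for i, byte in enumerate(...)' ported as structural recursion carrying the index i and ac.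
def computeKeyTagLoop (i : Nat) (ac : Int) : List Int → Int
  | [] => ac
  | byte :: rest =>
      if i % 2 == 0 then computeKeyTagLoop (i + 1) (ac + (byte <<< (8 : Nat))) rest
      else computeKeyTagLoop (i + 1) (ac + byte) rest

def compute_key_tag (dnskey_rdata : List Int) : Int :=
  let ac := computeKeyTagLoop 0 0 dnskey_rdata
  PySem.Int.band (PySem.Int.band ac 0xFFFF + (ac >>> (16 : Nat))) 0xFFFF

-- ===== PORT B =====
-- xs[0::2] (step-2 slice, not in PySem) ported by hand, exact for step 2 from the start on lists.
def everyOther : List Int → List Int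
  | [] => []
  | [x] => [x]
  | x :: _ :: rest => x :: everyOther rest

def compute_key_tag_alt (dnskey_rdata : List Int) : Int :=
  let hi := (everyOther dnskey_rdata).sum
  let lo := (everyOther (dnskey_rdata.drop 1)).sum
  let ac := (hi <<< (8 : Nat)) + lo
  PySem.Int.band (PySem.Int.band ac 0xFFFF + (ac >>> (16 : Nat))) 0xFFFF

-- ===== PRECONDITION & SPEC =====
def Spec_compute_key_tag (dnskey_rdata : List Int) (out : Int) : Prop := out = compute_key_tag_alt dnskey_rdata
instance (dnskey_rdata : List Int) (out : Int) : Decidable (Spec_compute_key_tag dnskey_rdata out) := by unfold Spec_compute_key_tag; infer_instance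

-- ===== CLAIM (what is proved, stated in full; the proofs are below) =====
def Claim_equal_compute_key_tag : Prop := ∀ (dnskey_rdata : List Int), Dom_compute_key_tag dnskey_rdata → Spec_compute_key_tag dnskey_rdata (compute_key_tag dnskey_rdata)

-- ===== LEMMAS AND PROOFS =====

theorem shiftLeft8 (x : Int) : x <<< (8 : Nat) = x * 256 := by
  simp [Int.shiftLeft_eq]

theorem everyOther_cons (x : Int) (xs : List Int) :
    everyOther (x :: xs) = x :: everyOther (xs.drop 1) := by
  cases xs <;> simp [everyOther]

-- Loop invariant: from an even index the loop adds 256·(even-slot sum) + (odd-slot sum).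
theorem computeKeyTagLoop_eq (xs : List Int) : ∀ (i : Nat) (ac : Int), i % 2 = 0 →
    computeKeyTagLoop i ac xs =
      ac + (everyOther xs).sum * 256 + (everyOther (xs.drop 1)).sum := by
  induction xs using everyOther.induct with
  | case1 => intro i ac _; simp [computeKeyTagLoop, everyOther]
  | case2 x =>
      intro i ac h0
      simp [computeKeyTagLoop, h0, everyOther, shiftLeft8]
  | case3 x y rest ih =>
      intro i ac h0
      have h1 : (i + 1) % 2 ≠ 0 := by omega
      simp only [computeKeyTagLoop, beq_iff_eq, h0, h1, if_pos, reduceIte]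
      rw [ih (i + 1 + 1) _ (by omega)]
      simp [everyOther_cons, shiftLeft8]
      ring

-- ===== VERDICT (by name: the statement is the Claim_ definition above) =====
theorem compute_key_tag_spec : Claim_equal_compute_key_tag := by
  intro xs _
  unfold Spec_compute_key_tag compute_key_tag compute_key_tag_alt
  simp only [computeKeyTagLoop_eq xs 0 0 rfl, shiftLeft8, zero_add]
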